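-- pv_equiv track=rewrite | github.com/prayas7102/pythoncoriolis | q10.py | split_and_join_with_hyphen
-- ===== SOURCE A (Python) =====
-- def split_and_join_with_hyphen(input_string):
--     """This function takes a input string.
--
--     Parameters:
--         str: input_string
--
--     Returns:
--         str: new string
--     """
--     output_string = ""
--     for char in input_string:
--         if char == " ":
--             output_string += "-"
--         else:
--             output_string += char
--     return output_string
-- ===== SOURCE B (Python) =====
-- def split_and_join_with_hyphen(input_string):
--     """Replace each space with a hyphen by splitting on single spaces
--     (preserving empty segments) and joining the segments with '-'."""
--     return "-".join(input_string.split(" "))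
-- ===== Notes on version B (the rewrite author's own statement) =====
-- stated objective: idiomatic
-- what changed: B builds the list of space-delimited segments with a single-space split and concatenates them with a hyphen join, instead of accumulating the output string character by character with repeated +=.
import Mathlib
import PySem

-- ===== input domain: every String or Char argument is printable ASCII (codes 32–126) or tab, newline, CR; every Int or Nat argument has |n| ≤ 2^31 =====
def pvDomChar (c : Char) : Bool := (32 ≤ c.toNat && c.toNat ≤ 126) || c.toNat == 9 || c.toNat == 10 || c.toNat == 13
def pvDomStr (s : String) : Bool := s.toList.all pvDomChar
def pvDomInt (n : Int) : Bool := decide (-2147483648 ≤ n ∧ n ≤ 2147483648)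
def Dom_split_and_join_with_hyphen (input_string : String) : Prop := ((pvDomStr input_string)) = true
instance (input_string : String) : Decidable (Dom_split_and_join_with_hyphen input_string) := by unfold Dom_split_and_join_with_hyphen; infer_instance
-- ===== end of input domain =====

-- B replaces A's character-by-character accumulation with split(" ") + "-".join (idiomatic).

-- ===== PORT A =====
-- output_string starts empty; for each char append "-" if it is a space, else the char itself.
def split_and_join_with_hyphen (input_string : String) : String :=
  String.mk (input_string.toList.foldl
    (fun output_string char =>
      if char == ' ' then output_string ++ ['-'] else output_string ++ [char]) [])

-- ===== PORT B =====
-- "-".join(input_string.split(" ")) ; the literals "-" and " " are ported as ['-'] and [' '].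
def split_and_join_with_hyphen_alt (input_string : String) : String :=
  String.mk (PySem.Chars.join ['-'] (PySem.Chars.splitOn input_string.toList [' ']))

-- ===== PRECONDITION & SPEC =====
def Spec_split_and_join_with_hyphen (input_string : String) (out : String) : Prop := out = split_and_join_with_hyphen_alt input_string
instance (input_string : String) (out : String) : Decidable (Spec_split_and_join_with_hyphen input_string out) := by unfold Spec_split_and_join_with_hyphen; infer_instance

-- ===== CLAIM (what is proved, stated in full; the proofs are below) =====
def Claim_equal_split_and_join_with_hyphen : Prop := ∀ (input_string : String), Dom_split_and_join_with_hyphen input_string → Spec_split_and_join_with_hyphen input_string (split_and_join_with_hyphen input_string)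

-- ===== LEMMAS AND PROOFS =====

-- The replacement both programs compute, character-wise.
def pvHy (c : Char) : Char := if c == ' ' then '-' else c

theorem pv_foldl_eq_map (l : List Char) (out : List Char) :
    l.foldl (fun output_string char =>
      if char == ' ' then output_string ++ ['-'] else output_string ++ [char]) out
    = out ++ l.map pvHy := by
  induction l generalizing out with
  | nil => simp
  | cons c rest ih =>
    simp only [List.foldl_cons, List.map_cons, ih, pvHy]
    by_cases h : c = ' ' <;> simp [h]

theorem pv_join_snoc (sep z : List Char) (ys : List (List Char)) (h : ys ≠ []) :
    PySem.Chars.join sep (ys ++ [z]) = PySem.Chars.join sep ys ++ sep ++ z := by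
  induction ys with
  | nil => exact absurd rfl h
  | cons y ys ih =>
    cases ys with
    | nil => simp [PySem.Chars.join, List.intercalate]
    | cons y' ys' =>
      have ih' := ih (by simp)
      simp only [List.cons_append] at *
      rw [PySem.Chars.join_cons_cons, PySem.Chars.join_cons_cons, ih']
      simp [List.append_assoc]

theorem pv_join_last_append (sep z w : List Char) (ys : List (List Char)) :
    PySem.Chars.join sep (ys ++ [z ++ w]) = PySem.Chars.join sep (ys ++ [z]) ++ w := by
  cases ys with
  | nil => simp [PySem.Chars.join, List.intercalate]
  | cons y ys =>
    rw [pv_join_snoc _ _ _ (by simp), pv_join_snoc _ _ _ (by simp)]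
    simp [List.append_assoc]

theorem pv_go_invariant (fuel : Nat) (l cur : List Char) (acc : List (List Char))
    (h : l.length < fuel) :
    PySem.Chars.join ['-'] (PySem.Chars.splitOn.go [' '] fuel l cur acc)
    = PySem.Chars.join ['-'] ((cur.reverse :: acc).reverse) ++ l.map pvHy := by
  induction fuel generalizing l cur acc with
  | zero => omega
  | succ fuel ih =>
    cases l with
    | nil => simp [PySem.Chars.splitOn.go]
    | cons c rest =>
      rw [PySem.Chars.splitOn.go]
      by_cases hc : c = ' '
      · have hp : List.isPrefixOf [' '] (c :: rest) = true := by simp [hc, List.isPrefixOf]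
        rw [if_pos hp]
        simp only [List.length_singleton, List.drop_one, List.tail_cons]
        rw [ih rest [] (cur.reverse :: acc) (by simpa using Nat.lt_of_succ_lt_succ h)]
        simp only [List.reverse_nil, List.reverse_cons]
        rw [pv_join_snoc _ _ _ (by simp)]
        simp [hc, pvHy, List.append_assoc]
      · have hp : List.isPrefixOf [' '] (c :: rest) = false := by
          simp only [List.isPrefixOf]
          simp
          exact fun h' => hc h'.symm
        rw [if_neg (by simp [hp])]
        rw [ih rest (c :: cur) acc (by simpa using Nat.lt_of_succ_lt_succ h)]
        simp only [List.reverse_cons]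
        rw [pv_join_last_append]
        simp [pvHy, hc, List.append_assoc]

-- ===== VERDICT (by name: the statement is the Claim_ definition above) =====
theorem split_and_join_with_hyphen_spec : Claim_equal_split_and_join_with_hyphen := by
  intro s _
  show _ = _
  unfold split_and_join_with_hyphen split_and_join_with_hyphen_alt
  rw [PySem.Chars.splitOn, pv_go_invariant _ _ _ _ (by omega), pv_foldl_eq_map]
  simp [PySem.Chars.join, List.intercalate]
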